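-- pv_equiv track=rewrite | github.com/NelsonGomesNeto/ProgramC | miau.py | countLost
-- ===== SOURCE A (Python) =====
-- def countLost(blocks, visited):
-- 	now, F, R = 0, 0, 0
-- 	for b in blocks:
-- 		v = blocks[b]
-- 		if (not (v == 'F' or v == 'R') and b not in visited): now += 1
-- 		if (v == 'F'): F += 1
-- 		if (v == 'R'): R += 1
-- 	return(now, F, R)
-- ===== SOURCE B (Python) =====
-- def countLost(blocks, visited):
--     vals = list(blocks.values())
--     F = vals.count('F')
--     R = vals.count('R')
--     now = sum(1 for b, v in blocks.items() if v != 'F' and v != 'R' and b not in visited)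
--     return (now, F, R)
-- ===== Notes on version B (the rewrite author's own statement) =====
-- stated objective: idiomatic
-- what changed: The single fused three-counter loop is replaced by a tabulate-then-scan structure: F and R are read off the value list with list.count, and 'now' is a separate generator-sum over the items.
import Mathlib
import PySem

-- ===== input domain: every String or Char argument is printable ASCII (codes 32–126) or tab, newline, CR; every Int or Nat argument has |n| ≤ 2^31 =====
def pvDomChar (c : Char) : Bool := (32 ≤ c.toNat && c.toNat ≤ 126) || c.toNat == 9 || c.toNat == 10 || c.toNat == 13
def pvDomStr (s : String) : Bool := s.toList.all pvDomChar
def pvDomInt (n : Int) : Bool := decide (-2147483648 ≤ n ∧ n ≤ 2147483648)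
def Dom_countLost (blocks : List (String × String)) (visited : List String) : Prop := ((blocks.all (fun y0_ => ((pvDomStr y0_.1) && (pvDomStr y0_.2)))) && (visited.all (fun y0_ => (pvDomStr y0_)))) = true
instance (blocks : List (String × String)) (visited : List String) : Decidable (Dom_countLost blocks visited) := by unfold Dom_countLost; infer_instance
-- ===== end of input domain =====

-- B replaces A's fused three-counter loop by a tabulate-then-scan structure (list.count for F/R, a separate filtered count for 'now'); objective: idiomatic.

-- ===== PORT A =====
def countLost (blocks : List (String × String)) (visited : List String) : Int × Int × Int :=
  blocks.foldl
    (fun (s : Int × Int × Int) p =>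
      let v := p.2
      let now := if !(v == "F" || v == "R") && !(visited.contains p.1) then s.1 + 1 else s.1
      let F := if v == "F" then s.2.1 + 1 else s.2.1
      let R := if v == "R" then s.2.2 + 1 else s.2.2
      (now, F, R))
    (0, 0, 0)

-- ===== PORT B =====
def countLost_alt (blocks : List (String × String)) (visited : List String) : Int × Int × Int :=
  let vals := blocks.map Prod.snd
  let F : Int := PySem.List.count vals "F"
  let R : Int := PySem.List.count vals "R"
  let now : Int := (blocks.countP (fun p => !(p.2 == "F") && !(p.2 == "R") && !(visited.contains p.1)) : Int)
  (now, F, R)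

-- ===== PRECONDITION & SPEC =====
def Spec_countLost (blocks : List (String × String)) (visited : List String) (out : Int × Int × Int) : Prop := out = countLost_alt blocks visited
instance (blocks : List (String × String)) (visited : List String) (out : Int × Int × Int) : Decidable (Spec_countLost blocks visited out) := by unfold Spec_countLost; infer_instance

-- ===== CLAIM (what is proved, stated in full; the proofs are below) =====
def Claim_equal_countLost : Prop := ∀ (blocks : List (String × String)) (visited : List String), Dom_countLost blocks visited → Spec_countLost blocks visited (countLost blocks visited)

-- ===== LEMMAS AND PROOFS =====
lemma countLost_loop (visited : List String) (bs : List (String × String)) :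
    ∀ n f r : Int,
      bs.foldl
        (fun (s : Int × Int × Int) p =>
          let v := p.2
          let now := if !(v == "F" || v == "R") && !(visited.contains p.1) then s.1 + 1 else s.1
          let F := if v == "F" then s.2.1 + 1 else s.2.1
          let R := if v == "R" then s.2.2 + 1 else s.2.2
          (now, F, R))
        (n, f, r)
      = (n + (bs.countP (fun p => !(p.2 == "F") && !(p.2 == "R") && !(visited.contains p.1)) : Int),
         f + (bs.countP (fun p => p.2 == "F") : Int),
         r + (bs.countP (fun p => p.2 == "R") : Int)) := by
  induction bs with
  | nil => intro n f r; simp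
  | cons hd tl ih =>
    intro n f r
    simp only [List.foldl_cons, List.countP_cons, ih]
    split_ifs with h1 h2 h3 <;>
      simp_all [Prod.ext_iff] <;> omega

theorem countLost_spec : Claim_equal_countLost := by
  intro blocks visited _
  unfold Spec_countLost countLost countLost_alt
  rw [countLost_loop]
  simp [PySem.List.count, List.count_eq_countP, List.countP_map, Function.comp_def]
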